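-- pv_equiv track=rewrite | github.com/MoreCowwbell/TheFarm | schemas/intake_session.py | detect_document_format
-- ===== SOURCE A (Python) =====
-- from enum import Enum
--
-- class DocumentFormat(str, Enum):
--     """Supported document formats."""
--     PDF = "pdf"
--     URL = "url"
--     EXCEL = "excel"
--     CSV = "csv"
--     IMAGE = "image"
--     WORD = "word"
--     MARKDOWN = "markdown"
--     TEXT = "text"
--     FOLDER = "folder"
--     UNKNOWN = "unknown"
--
-- def detect_document_format(filename: str) -> DocumentFormat:
--     """Detect document format from filename."""
--     filename_lower = filename.lower()
--
--     if filename_lower.startswith(("http://", "https://")):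
--         return DocumentFormat.URL
--
--     extension_map = {
--         ".pdf": DocumentFormat.PDF,
--         ".xlsx": DocumentFormat.EXCEL,
--         ".xls": DocumentFormat.EXCEL,
--         ".csv": DocumentFormat.CSV,
--         ".png": DocumentFormat.IMAGE,
--         ".jpg": DocumentFormat.IMAGE,
--         ".jpeg": DocumentFormat.IMAGE,
--         ".gif": DocumentFormat.IMAGE,
--         ".webp": DocumentFormat.IMAGE,
--         ".doc": DocumentFormat.WORD,
--         ".docx": DocumentFormat.WORD,
--         ".md": DocumentFormat.MARKDOWN,
--         ".txt": DocumentFormat.TEXT,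
--     }
--
--     for ext, fmt in extension_map.items():
--         if filename_lower.endswith(ext):
--             return fmt
--
--     return DocumentFormat.UNKNOWN
-- ===== SOURCE B (Python) =====
-- from enum import Enum
--
-- class DocumentFormat(str, Enum):
--     """Supported document formats."""
--     PDF = "pdf"
--     URL = "url"
--     EXCEL = "excel"
--     CSV = "csv"
--     IMAGE = "image"
--     WORD = "word"
--     MARKDOWN = "markdown"
--     TEXT = "text"
--     FOLDER = "folder"
--     UNKNOWN = "unknown"
--
-- _EXT_MAP = {
--     ".pdf": DocumentFormat.PDF,
--     ".xlsx": DocumentFormat.EXCEL,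
--     ".xls": DocumentFormat.EXCEL,
--     ".csv": DocumentFormat.CSV,
--     ".png": DocumentFormat.IMAGE,
--     ".jpg": DocumentFormat.IMAGE,
--     ".jpeg": DocumentFormat.IMAGE,
--     ".gif": DocumentFormat.IMAGE,
--     ".webp": DocumentFormat.IMAGE,
--     ".doc": DocumentFormat.WORD,
--     ".docx": DocumentFormat.WORD,
--     ".md": DocumentFormat.MARKDOWN,
--     ".txt": DocumentFormat.TEXT,
-- }
--
-- def detect_document_format(filename: str) -> DocumentFormat:
--     """Detect document format from filename."""
--     filename_lower = filename.lower()
--     if filename_lower.startswith(("http://", "https://")):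
--         return DocumentFormat.URL
--     idx = filename_lower.rfind('.')
--     ext = filename_lower[idx:] if idx != -1 else ''
--     return _EXT_MAP.get(ext, DocumentFormat.UNKNOWN)
-- ===== Notes on version B (the rewrite author's own statement) =====
-- stated objective: idiomatic
-- what changed: Replaces the loop over the extension map testing endswith for each key by a single key extraction (suffix from the last '.') followed by one dictionary lookup with a default.
import Mathlib
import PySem

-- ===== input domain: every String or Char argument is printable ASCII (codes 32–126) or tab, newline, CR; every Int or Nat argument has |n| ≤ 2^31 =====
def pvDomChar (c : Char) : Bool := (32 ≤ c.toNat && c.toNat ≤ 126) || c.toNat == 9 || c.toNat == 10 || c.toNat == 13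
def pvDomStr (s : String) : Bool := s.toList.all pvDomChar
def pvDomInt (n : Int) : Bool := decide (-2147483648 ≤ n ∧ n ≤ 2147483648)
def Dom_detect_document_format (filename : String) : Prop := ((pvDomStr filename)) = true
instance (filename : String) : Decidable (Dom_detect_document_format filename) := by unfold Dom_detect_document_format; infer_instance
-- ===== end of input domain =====

-- B replaces A's endswith loop over the extension map by extracting the suffix
-- from the last '.' once and doing a single map lookup (idiomatic; same cost class).

-- ===== PORT A =====
-- the extension_map dict literal, in insertion order (keys as char lists)
def pvExtItems : List (List Char × String) :=
  [ (".pdf".toList, "pdf"), (".xlsx".toList, "excel"), (".xls".toList, "excel"),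
    (".csv".toList, "csv"), (".png".toList, "image"), (".jpg".toList, "image"),
    (".jpeg".toList, "image"), (".gif".toList, "image"), (".webp".toList, "image"),
    (".doc".toList, "word"), (".docx".toList, "word"), (".md".toList, "markdown"),
    (".txt".toList, "text") ]

-- the 'for ext, fmt in extension_map.items(): if filename_lower.endswith(ext): return fmt' loop
def pvALoop (items : List (List Char × String)) (fl : List Char) : String :=
  match items with
  | [] => "unknown"
  | (ext, fmt) :: rest => if PySem.Chars.endswith fl ext then fmt else pvALoop rest fl

def detect_document_format (filename : String) : String :=
  let fl := PySem.Chars.lower filename.toList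
  if PySem.Chars.startswith fl "http://".toList || PySem.Chars.startswith fl "https://".toList then
    "url"
  else
    pvALoop pvExtItems fl

-- ===== PORT B =====
-- hand port of idx = fl.rfind('.'); ext = fl[idx:] if idx != -1 else '':
-- returns the suffix of fl starting at its LAST '.', or none when fl has no '.'
def pvLastDotSuffix : List Char → Option (List Char)
  | [] => none
  | c :: cs =>
    match pvLastDotSuffix cs with
    | some s => some s
    | none => if c = '.' then some (c :: cs) else none

-- _EXT_MAP.get(ext, "unknown"): first-match association-list lookup with default
def pvBGet (items : List (List Char × String)) (ext : List Char) : String :=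
  match items with
  | [] => "unknown"
  | (k, v) :: rest => if k = ext then v else pvBGet rest ext

def detect_document_format_alt (filename : String) : String :=
  let fl := PySem.Chars.lower filename.toList
  if PySem.Chars.startswith fl "http://".toList || PySem.Chars.startswith fl "https://".toList then
    "url"
  else
    match pvLastDotSuffix fl with
    | some ext => pvBGet pvExtItems ext
    | none => pvBGet pvExtItems []   -- ext = '' is not a key, lookup yields the default

-- ===== PRECONDITION & SPEC =====
def Spec_detect_document_format (filename : String) (out : String) : Prop := out = detect_document_format_alt filename
instance (filename : String) (out : String) : Decidable (Spec_detect_document_format filename out) := by unfold Spec_detect_document_format; infer_instance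

-- ===== CLAIM (what is proved, stated in full; the proofs are below) =====
def Claim_equal_detect_document_format : Prop := ∀ (filename : String), Dom_detect_document_format filename → Spec_detect_document_format filename (detect_document_format filename)

-- ===== LEMMAS AND PROOFS =====

-- a key is well-shaped: a '.' followed by a dot-free tail
def pvKeyOK (k : List Char) : Bool :=
  match k with
  | c :: r => decide (c = '.') && decide ('.' ∉ r)
  | [] => false

lemma pvLastDot_eq_none_iff (l : List Char) : pvLastDotSuffix l = none ↔ '.' ∉ l := by
  induction l with
  | nil => simp [pvLastDotSuffix]
  | cons c cs ih =>
    cases hcs : pvLastDotSuffix cs with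
    | some s =>
      have hmem : '.' ∈ cs := by
        by_contra hc
        rw [ih.2 hc] at hcs; cases hcs
      simp [pvLastDotSuffix, hcs, hmem]
    | none =>
      have hnm : '.' ∉ cs := ih.1 hcs
      by_cases hc : c = '.'
      · simp [pvLastDotSuffix, hcs, hc]
      · simp [pvLastDotSuffix, hcs, hc, hnm]
        exact fun h => hc h.symm

lemma pvSuffix_of_lastDot (l k : List Char) (h : pvLastDotSuffix l = some k) : k <:+ l := by
  induction l with
  | nil => simp [pvLastDotSuffix] at h
  | cons c cs ih =>
    cases hcs : pvLastDotSuffix cs with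
    | some s =>
      simp only [pvLastDotSuffix, hcs] at h
      exact (ih (by rw [hcs, h])).trans (List.suffix_cons c cs)
    | none =>
      simp only [pvLastDotSuffix, hcs] at h
      by_cases hc : c = '.'
      · rw [hc]
        simp only [hc] at h
        simp at h
        rw [← h]
      · simp [hc] at h

lemma pvLastDot_of_suffix (l r : List Char) (hs : ('.' :: r) <:+ l) (hr : '.' ∉ r) :
    pvLastDotSuffix l = some ('.' :: r) := by
  induction l with
  | nil => exact absurd (List.eq_nil_of_suffix_nil hs) (by simp)
  | cons c cs ih =>
    rcases List.suffix_cons_iff.1 hs with heq | hsuf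
    · cases heq
      simp [pvLastDotSuffix, (pvLastDot_eq_none_iff r).2 hr]
    · simp [pvLastDotSuffix, ih hsuf]

-- a well-shaped key is a suffix of fl iff it is exactly the last-dot suffix of fl
lemma pvKey_suffix_iff (fl k : List Char) (hk : pvKeyOK k = true) :
    k <:+ fl ↔ pvLastDotSuffix fl = some k := by
  constructor
  · intro h
    cases k with
    | nil => simp [pvKeyOK] at hk
    | cons c r =>
      simp only [pvKeyOK, Bool.and_eq_true, decide_eq_true_eq] at hk
      obtain ⟨hc, hr⟩ := hk
      subst hc
      exact pvLastDot_of_suffix fl r h hr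
  · exact pvSuffix_of_lastDot fl k

-- the endswith loop equals last-dot extraction + association lookup
lemma pvLoop_eq (items : List (List Char × String)) (fl : List Char)
    (hsh : ∀ p ∈ items, pvKeyOK p.1 = true) :
    pvALoop items fl =
      match pvLastDotSuffix fl with
      | some ext => pvBGet items ext
      | none => "unknown" := by
  induction items with
  | nil => cases pvLastDotSuffix fl <;> simp [pvALoop, pvBGet]
  | cons p rest ih =>
    obtain ⟨k, v⟩ := p
    have hk : pvKeyOK k = true := hsh (k, v) (by simp)
    have hrest : ∀ p ∈ rest, pvKeyOK p.1 = true := fun p hp => hsh p (by simp [hp])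
    cases hfl : pvLastDotSuffix fl with
    | none =>
      have hns : ¬ k <:+ fl := fun h => by
        rw [pvKey_suffix_iff fl k hk] at h; rw [hfl] at h; cases h
      have hew : PySem.Chars.endswith fl k = false := by
        rw [← Bool.not_eq_true, PySem.Chars.endswith_iff]; exact hns
      have := ih hrest
      rw [hfl] at this
      simpa [pvALoop, hew] using this
    | some e =>
      by_cases hke : k = e
      · subst hke
        have hsuf : k <:+ fl := (pvKey_suffix_iff fl k hk).2 hfl
        have hew : PySem.Chars.endswith fl k = true := (PySem.Chars.endswith_iff fl k).2 hsuf
        simp [pvALoop, hew, pvBGet]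
      · have hns : ¬ k <:+ fl := fun h => by
          rw [pvKey_suffix_iff fl k hk, hfl, Option.some.injEq] at h
          exact hke h.symm
        have hew : PySem.Chars.endswith fl k = false := by
          rw [← Bool.not_eq_true, PySem.Chars.endswith_iff]; exact hns
        have := ih hrest
        rw [hfl] at this
        simp [pvALoop, hew, pvBGet, hke, this]

lemma pvExtItems_shape : ∀ p ∈ pvExtItems, pvKeyOK p.1 = true := by decide

-- ===== VERDICT (by name: the statement is the Claim_ definition above) =====
theorem detect_document_format_spec : Claim_equal_detect_document_format := by
  intro filename _
  unfold Spec_detect_document_format detect_document_format detect_document_format_alt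
  dsimp only
  split_ifs with hurl
  · rfl
  · rw [pvLoop_eq pvExtItems _ pvExtItems_shape]
    cases h : pvLastDotSuffix (PySem.Chars.lower filename.toList) <;> rfl
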